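-- pv_equiv track=rewrite | github.com/GlaIZier/minbpe-tokenizer | minbpe_tokenizer/tokenizer.py | _split_ids
-- ===== SOURCE A (Python) =====
-- from typing import List, Iterable, Tuple, Any
--
-- def _split_ids(ids: Iterable[int], separators: set[int]) -> list[list[int]]:
--     list_of_list = []
--     _list = []
--     for _id in ids:
--         if _id in separators:
--             if _list:
--                 list_of_list.append(_list)
--                 _list = []
--             list_of_list.append([_id])
--         else:
--             _list.append(_id)
--     if _list:
--         list_of_list.append(_list)
--     return list_of_list
-- ===== SOURCE B (Python) =====
-- def _split_ids(ids, separators):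
--     xs = list(ids)
--     cuts = [k for k, x in enumerate(xs) if x in separators]
--     out = []
--     for lo, hi in zip([-1] + cuts, cuts + [len(xs)]):
--         if lo >= 0:
--             out.append(xs[lo:lo + 1])
--         if hi > lo + 1:
--             out.append(xs[lo + 1:hi])
--     return out
-- ===== Notes on version B (the rewrite author's own statement) =====
-- stated objective: alternative
-- what changed: Replaces A's one-pass accumulator/flush state machine with a staged index-based algorithm: first collect all separator positions, then emit the output purely by slicing the list between consecutive boundary pairs (zip of shifted cut lists), with no running buffer or flush state.
import Mathlib
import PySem

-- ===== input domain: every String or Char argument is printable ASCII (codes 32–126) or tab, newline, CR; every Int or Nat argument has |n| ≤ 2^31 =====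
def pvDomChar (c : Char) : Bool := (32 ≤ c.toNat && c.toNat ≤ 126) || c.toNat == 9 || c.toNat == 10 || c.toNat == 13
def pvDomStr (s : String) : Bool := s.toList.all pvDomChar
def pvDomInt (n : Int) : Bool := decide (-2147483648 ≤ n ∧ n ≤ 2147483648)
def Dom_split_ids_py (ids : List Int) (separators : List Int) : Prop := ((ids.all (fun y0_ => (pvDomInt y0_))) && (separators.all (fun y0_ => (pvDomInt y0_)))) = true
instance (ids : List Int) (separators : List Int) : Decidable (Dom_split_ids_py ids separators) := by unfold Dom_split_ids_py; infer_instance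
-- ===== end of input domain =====

-- B replaces A's one-pass accumulator/flush state machine by a staged index-based
-- algorithm: collect all separator positions first, then emit the output purely by
-- slicing between consecutive boundary pairs; same return value, alternative structure.

-- ===== PORT A =====
-- literal transliteration of A's loop: state = (list_of_list, _list)
def split_ids_py (ids : List Int) (separators : List Int) : List (List Int) :=
  let st := ids.foldl
    (fun (s : List (List Int) × List Int) _id =>
      if separators.contains _id then
        ((if s.2 ≠ [] then s.1 ++ [s.2] else s.1) ++ [[_id]], [])
      else
        (s.1, s.2 ++ [_id]))
    ([], [])
  if st.2 ≠ [] then st.1 ++ [st.2] else st.1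

-- ===== PORT B =====
-- cuts = [k for k, x in enumerate(xs, s) if x in separators]  (Source B uses s = 0;
-- the start parameter mirrors enumerate's and is needed by the proofs' shift lemma)
def pvCuts (sep : List Int) (xs : List Int) (s : Int) : List Int :=
  (PySem.List.enumerate xs s).filterMap (fun p => if sep.contains p.2 then some p.1 else none)

-- the loop over zip([-1] + cuts, cuts + [len(xs)]) with its two conditional appends
def split_ids_py_alt (ids : List Int) (separators : List Int) : List (List Int) :=
  let cuts := pvCuts separators ids 0
  (List.zip ((-1) :: cuts) (cuts ++ [(ids.length : Int)])).foldl
    (fun out p =>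
      let out := if p.1 ≥ 0 then out ++ [PySem.List.slice ids (some p.1) (some (p.1 + 1))] else out
      if p.2 > p.1 + 1 then out ++ [PySem.List.slice ids (some (p.1 + 1)) (some p.2)] else out)
    []

-- ===== PRECONDITION & SPEC =====
def Spec_split_ids_py (ids : List Int) (separators : List Int) (out : List (List Int)) : Prop := out = split_ids_py_alt ids separators
instance (ids : List Int) (separators : List Int) (out : List (List Int)) : Decidable (Spec_split_ids_py ids separators out) := by unfold Spec_split_ids_py; infer_instance

-- ===== CLAIM =====
def Claim_equal_split_ids_py : Prop := ∀ (ids : List Int) (separators : List Int), Dom_split_ids_py ids separators → Spec_split_ids_py ids separators (split_ids_py ids separators)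

-- ===== LEMMAS AND PROOFS =====

-- result of A's loop starting from current chunk `cur`, with empty outer acc
def pvG (sep : List Int) (cur : List Int) : List Int → List (List Int)
  | [] => if cur ≠ [] then [cur] else []
  | x :: xs =>
      if sep.contains x then
        (if cur ≠ [] then [cur] else []) ++ [x] :: pvG sep [] xs
      else
        pvG sep (cur ++ [x]) xs

theorem pvA_foldl (sep : List Int) :
    ∀ (rest : List Int) (acc : List (List Int)) (cur : List Int),
      (let st := rest.foldl
        (fun (s : List (List Int) × List Int) _id =>
          if sep.contains _id then
            ((if s.2 ≠ [] then s.1 ++ [s.2] else s.1) ++ [[_id]], [])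
          else
            (s.1, s.2 ++ [_id])) (acc, cur)
       if st.2 ≠ [] then st.1 ++ [st.2] else st.1)
      = acc ++ pvG sep cur rest := by
  intro rest
  induction rest with
  | nil =>
      intro acc cur
      simp only [List.foldl_nil, pvG]
      split <;> simp
  | cons x xs ih =>
      intro acc cur
      simp only [List.foldl_cons, pvG]
      by_cases hx : sep.contains x = true
      · simp only [hx, ite_true]
        rw [ih]
        by_cases hc : cur = []
        · simp [hc]
        · simp [hc, List.append_assoc]
      · simp only [hx, ite_false, Bool.false_eq_true]
        rw [ih]

theorem pvG_nonsep_run (sep : List Int) :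
    ∀ (t cur r : List Int), (∀ y ∈ t, sep.contains y = false) →
      pvG sep cur (t ++ r) = pvG sep (cur ++ t) r := by
  intro t
  induction t with
  | nil => intro cur r _; simp
  | cons y t ih =>
      intro cur r h
      have hy := h y (by simp)
      simp only [List.cons_append, pvG, hy]
      rw [ih (cur ++ [y]) r (fun z hz => h z (by simp [hz]))]
      simp

theorem pv_head_dropWhile {α : Type} (p : α → Bool) :
    ∀ (xs : List α) (y : α), (xs.dropWhile p).head? = some y → p y = false := by
  intro xs
  induction xs with
  | nil => intro y h; simp [List.dropWhile] at h
  | cons x xs ih =>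
      intro y h
      by_cases hx : p x = true
      · rw [List.dropWhile_cons_of_pos hx] at h; exact ih y h
      · rw [List.dropWhile_cons_of_neg (by simpa using hx)] at h
        simp only [List.head?_cons, Option.some.injEq] at h
        subst h
        simpa using hx

-- one pair's contribution to B's output
def pvEmit (xs : List Int) (p : Int × Int) : List (List Int) :=
  (if p.1 ≥ 0 then [PySem.List.slice xs (some p.1) (some (p.1 + 1))] else []) ++
  (if p.2 > p.1 + 1 then [PySem.List.slice xs (some (p.1 + 1)) (some p.2)] else [])

theorem pvCuts_cons (sep : List Int) (x : Int) (xs : List Int) (s : Int) :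
    pvCuts sep (x :: xs) s = (if sep.contains x then [s] else []) ++ pvCuts sep xs (s + 1) := by
  simp only [pvCuts, PySem.List.enumerate_cons, List.filterMap_cons]
  cases h : sep.contains x <;> simp only [h, ite_true, Bool.false_eq_true, ite_false] <;> rfl

theorem pvCuts_append (sep : List Int) (xs ys : List Int) (s : Int) :
    pvCuts sep (xs ++ ys) s = pvCuts sep xs s ++ pvCuts sep ys (s + xs.length) := by
  simp [pvCuts, PySem.List.enumerate_append, List.filterMap_append]

theorem pvCuts_shift (sep : List Int) :
    ∀ (xs : List Int) (s : Int), pvCuts sep xs s = (pvCuts sep xs 0).map (· + s) := by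
  intro xs
  induction xs with
  | nil => intro s; simp [pvCuts, PySem.List.enumerate_nil]
  | cons x xs ih =>
      intro s
      rw [pvCuts_cons, pvCuts_cons, ih (s + 1), ih (0 + 1)]
      have hmap : ∀ (l : List Int),
          (l.map (· + (0 + 1))).map (· + s) = l.map (· + (s + 1)) := by
        intro l; rw [List.map_map]; congr 1; funext a; simp; omega
      cases h : sep.contains x
      · simp only [h, Bool.false_eq_true, ite_false, List.nil_append, List.map_append, hmap]
      · simp only [h, ite_true, List.cons_append, List.nil_append, List.map_cons, List.map_append,
          hmap]
        congr 1
        omega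

theorem pvCuts_nil_of_nonsep (sep : List Int) :
    ∀ (xs : List Int) (s : Int), (∀ y ∈ xs, sep.contains y = false) → pvCuts sep xs s = [] := by
  intro xs
  induction xs with
  | nil => intro s _; simp [pvCuts, PySem.List.enumerate_nil]
  | cons x xs ih =>
      intro s h
      rw [pvCuts_cons, h x (by simp), ih (s + 1) (fun z hz => h z (by simp [hz]))]
      simp

theorem pvCuts_nonneg (sep : List Int) :
    ∀ (xs : List Int) (s : Int) (a : Int), a ∈ pvCuts sep xs s → s ≤ a := by
  intro xs
  induction xs with
  | nil => intro s a h; simp [pvCuts, PySem.List.enumerate_nil] at h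
  | cons x xs ih =>
      intro s a h
      rw [pvCuts_cons] at h
      rcases List.mem_append.mp h with h | h
      · cases hx : sep.contains x <;> rw [hx] at h <;> simp at h; omega
      · have := ih (s + 1) a h; omega

-- slice shift: slicing pre ++ ys at indices shifted by |pre| slices ys
theorem pv_slice_shift (pre ys : List Int) (a b : Int) (ha : 0 ≤ a) (hb : 0 ≤ b) :
    PySem.List.slice (pre ++ ys) (some (a + pre.length)) (some (b + pre.length))
      = PySem.List.slice ys (some a) (some b) := by
  rw [PySem.List.slice_toNat _ (by omega) (by omega), PySem.List.slice_toNat _ ha hb]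
  have h1 : (a + (pre.length : Int)).toNat = pre.length + a.toNat := by omega
  have h2 : (b + (pre.length : Int)).toNat - (a + (pre.length : Int)).toNat = b.toNat - a.toNat := by omega
  rw [h2, h1, List.drop_append]
  rw [List.drop_eq_nil_of_le (by omega : pre.length ≤ pre.length + a.toNat)]
  rw [show pre.length + a.toNat - pre.length = a.toNat from by omega]
  simp

theorem pvEmit_shift (pre ys : List Int) (a b : Int) (ha : 0 ≤ a) (hb : 0 ≤ b) :
    pvEmit (pre ++ ys) (a + pre.length, b + pre.length) = pvEmit ys (a, b) := by
  simp only [pvEmit]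
  rw [show (a + (pre.length : Int) + 1) = (a + 1) + pre.length from by ring]
  rw [pv_slice_shift pre ys a (a+1) ha (by omega), pv_slice_shift pre ys (a+1) b (by omega) hb]
  rw [if_pos (show a + (pre.length : Int) ≥ 0 by omega), if_pos (show a ≥ (0:Int) from ha)]
  by_cases hba : b > a + 1
  · rw [if_pos (show b + (pre.length : Int) > (a + 1) + (pre.length : Int) by omega), if_pos hba]
  · rw [if_neg (show ¬ (b + (pre.length : Int) > (a + 1) + (pre.length : Int)) by omega),
        if_neg hba]

-- B's flatMap over the boundary pairs equals A's recursion pvG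
theorem pvB_eq_pvG (sep : List Int) :
    ∀ (n : Nat) (xs : List Int), xs.length = n →
      (List.zip ((-1) :: pvCuts sep xs 0) (pvCuts sep xs 0 ++ [(xs.length : Int)])).flatMap
          (pvEmit xs)
        = pvG sep [] xs := by
  intro n
  induction n using Nat.strong_induction_on with
  | _ n ih =>
    intro xs hn
    by_cases hall : ∀ y ∈ xs, sep.contains y = false
    · -- no separator at all: one pair (-1, len)
      rw [pvCuts_nil_of_nonsep sep xs 0 hall]
      have : pvG sep [] xs = if xs ≠ [] then [xs] else [] := by
        have := pvG_nonsep_run sep xs [] [] hall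
        simpa [pvG] using this
      rw [this]
      simp only [List.nil_append, List.zip_cons_cons, List.zip_nil_right, List.flatMap_cons,
        List.flatMap_nil, List.append_nil, pvEmit]
      rw [if_neg (show ¬ ((-1:Int) ≥ 0) by omega), show ((-1:Int) + 1) = 0 from by ring]
      have hsl : PySem.List.slice xs (some 0) (some (xs.length : Int)) = xs := by
        rw [PySem.List.slice_toNat xs (by omega) (by omega)]
        simp
      rw [hsl]
      by_cases hxe : xs = []
      · simp [hxe]
      · have hlp : 0 < xs.length := List.length_pos_of_ne_nil hxe
        rw [if_pos (show ((xs.length : Int) > 0) by omega), if_pos hxe]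
        rfl
    · -- xs = t ++ y :: ys with t separator-free, y a separator
      push_neg at hall
      set p : Int → Bool := fun z => !(sep.contains z) with hp
      have hsplit : xs.takeWhile p ++ xs.dropWhile p = xs := List.takeWhile_append_dropWhile
      set t := xs.takeWhile p with ht
      have ht_nonsep : ∀ y ∈ t, sep.contains y = false := by
        intro z hz
        have := List.mem_takeWhile_imp hz
        simpa [hp] using this
      obtain ⟨w, hw, hws⟩ := hall
      have hdne : xs.dropWhile p ≠ [] := by
        intro hempty
        have : ∀ z ∈ xs, sep.contains z = false := by
          intro z hz
          rw [← hsplit] at hz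
          rcases List.mem_append.mp hz with h | h
          · exact ht_nonsep z h
          · rw [hempty] at h; simp at h
        rw [this w hw] at hws; simp at hws
      obtain ⟨y, ys, hyys⟩ := List.exists_cons_of_ne_nil hdne
      have hy : sep.contains y = true := by
        have := pv_head_dropWhile p xs y (by rw [hyys]; rfl)
        simpa [hp] using this
      have hxs : xs = t ++ y :: ys := by rw [← hsplit, hyys]
      -- compute the cut list
      have hcuts : pvCuts sep xs 0
          = (t.length : Int) :: (pvCuts sep ys 0).map (· + ((t.length : Int) + 1)) := by
        rw [hxs, pvCuts_append, pvCuts_nil_of_nonsep sep t 0 ht_nonsep, pvCuts_cons, hy,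
            pvCuts_shift sep ys ((0 : Int) + t.length + 1)]
        simp
      -- RHS via pvG
      have hG : pvG sep [] xs
          = (if (t.length : Int) > 0 then [t] else []) ++ [y] :: pvG sep [] ys := by
        rw [hxs, pvG_nonsep_run sep t [] (y :: ys) ht_nonsep]
        simp only [List.nil_append, pvG, hy, ite_true]
        congr 1
        by_cases hte : t = []
        · simp [hte]
        · have hlt : 0 < t.length := List.length_pos_of_ne_nil hte
          rw [if_pos hte, if_pos (show ((t.length : Int) > 0) by omega)]
      rw [hG, hcuts]
      set L : Int := (t.length : Int) with hL
      set cys := pvCuts sep ys 0 with hcys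
      have hlen : (xs.length : Int) = (ys.length : Int) + (L + 1) := by
        rw [hxs]; simp [hL]; omega
      -- peel off the first pair (-1, L)
      simp only [List.cons_append, List.zip_cons_cons, List.flatMap_cons]
      have hfirst : pvEmit xs (-1, L) = if L > 0 then [t] else [] := by
        simp only [pvEmit]
        rw [show ((-1 : Int) + 1) = 0 from by ring]
        have hsl : PySem.List.slice xs (some 0) (some L) = t := by
          rw [PySem.List.slice_toNat _ (by omega) (by omega)]
          rw [hxs, hL]
          rw [show ((t.length : Int)).toNat = t.length from by omega]
          simp
        rw [hsl, if_neg (show ¬ ((-1 : Int) ≥ 0) by omega)]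
        simp
      rw [hfirst]
      -- the remaining pairs are the ys-level pairs shifted by L + 1
      have hzip : List.zip (L :: cys.map (· + (L + 1))) (cys.map (· + (L + 1)) ++ [(xs.length : Int)])
          = (List.zip ((-1) :: cys) (cys ++ [(ys.length : Int)])).map
              (Prod.map (· + (L + 1)) (· + (L + 1))) := by
        rw [show (L :: cys.map (· + (L + 1))) = ((-1) :: cys).map (· + (L + 1)) from by
              simp]
        rw [show (cys.map (· + (L + 1)) ++ [(xs.length : Int)])
              = (cys ++ [(ys.length : Int)]).map (· + (L + 1)) from by
              simp [hlen]]
        rw [List.zip_map]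
      rw [hzip, List.flatMap_map]
      have hpre : xs = (t ++ [y]) ++ ys := by rw [hxs]; simp
      have hpreL : (((t ++ [y]).length : Int)) = L + 1 := by simp [hL]
      have hbody : ∀ q ∈ List.zip ((-1 : Int) :: cys) (cys ++ [(ys.length : Int)]),
          pvEmit xs (Prod.map (· + (L + 1)) (· + (L + 1)) q)
            = (if q.1 = -1 then [[y]] else []) ++ pvEmit ys q := by
        intro q hq
        obtain ⟨q1, q2⟩ := q
        obtain ⟨hq1, hq2⟩ := List.of_mem_zip hq
        have hq2' : (0:Int) ≤ q2 := by
          rcases List.mem_append.mp hq2 with h | h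
          · exact pvCuts_nonneg sep ys 0 q2 h
          · simp at h; omega
        rcases List.mem_cons.mp hq1 with h1 | h1
        · -- q1 = -1 : shifted pair is (L, q2 + L + 1); emits [y] then the slice of ys
          subst h1
          simp only [Prod.map, pvEmit, ite_true]
          have hsing : PySem.List.slice xs (some ((-1) + (L + 1))) (some ((-1) + (L + 1) + 1))
              = [y] := by
            rw [show ((-1 : Int) + (L + 1)) = L from by ring]
            rw [PySem.List.slice_toNat xs (by omega) (by omega)]
            rw [hxs]
            rw [show L.toNat = t.length from by omega,
                show ((L + 1 : Int)).toNat = t.length + 1 from by omega,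
                show t.length + 1 - t.length = 1 from by omega]
            rw [List.drop_left]
            rfl
          have hslice : PySem.List.slice xs (some ((-1) + (L + 1) + 1)) (some (q2 + (L + 1)))
              = PySem.List.slice ys (some 0) (some q2) := by
            rw [show ((-1 : Int) + (L + 1) + 1) = 0 + ((t ++ [y]).length : Int) from by
                  rw [hpreL]; ring,
                show (q2 + (L + 1)) = q2 + ((t ++ [y]).length : Int) from by rw [hpreL],
                hpre]
            exact pv_slice_shift (t ++ [y]) ys 0 q2 (by omega) hq2'
          rw [hsing, hslice]
          rw [if_pos (show ((-1 : Int) + (L + 1)) ≥ 0 by omega),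
              if_neg (show ¬ ((-1 : Int) ≥ 0) by omega),
              show ((-1 : Int) + 1) = 0 from by ring]
          simp only [List.nil_append, List.cons_append]
          by_cases hq0 : (0:Int) < q2
          · rw [if_pos (show q2 + (L + 1) > (-1) + (L + 1) + 1 by omega),
              if_pos (show q2 > 0 by omega)]
          · rw [if_neg (show ¬ (q2 + (L + 1) > (-1) + (L + 1) + 1) by omega),
              if_neg (show ¬ (q2 > 0) by omega)]
        · -- q1 ∈ cys, so 0 ≤ q1 and the shifted pair emits exactly the ys-level pieces
          have hq1' : (0:Int) ≤ q1 := pvCuts_nonneg sep ys 0 q1 h1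
          rw [if_neg (show ¬ ((q1, q2).1 = -1) by simp; omega)]
          simp only [Prod.map, List.nil_append]
          rw [show (q1 + (L + 1)) = q1 + ((t ++ [y]).length : Int) from by rw [hpreL],
              show (q2 + (L + 1)) = q2 + ((t ++ [y]).length : Int) from by rw [hpreL],
              hpre]
          exact pvEmit_shift (t ++ [y]) ys q1 q2 hq1' hq2'
      rw [List.flatMap_congr hbody]
      have hIH := ih ys.length (by rw [← hn, hxs]; simp; omega) ys rfl
      rw [← hcys] at hIH
      congr 1
      obtain ⟨c, rest, hzr, hrest⟩ :
          ∃ c rest, List.zip ((-1:Int) :: cys) (cys ++ [(ys.length : Int)]) = (-1, c) :: rest ∧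
            ∀ q ∈ rest, q.1 ≠ -1 := by
        cases hc : cys with
        | nil => exact ⟨(ys.length : Int), [], rfl, by simp⟩
        | cons c cs =>
            refine ⟨c, List.zip (c :: cs) (cs ++ [(ys.length : Int)]), rfl, ?_⟩
            intro q hq
            have hmem := (List.of_mem_zip hq).1
            have : (0:Int) ≤ q.1 := by
              apply pvCuts_nonneg sep ys 0
              rw [← hcys, hc]
              exact hmem
            omega
      rw [hzr] at hIH ⊢
      simp only [List.flatMap_cons, ite_true] at hIH ⊢
      rw [List.flatMap_congr (fun q hq => by
        rw [if_neg (hrest q hq)]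
        simp : ∀ q ∈ rest, (if q.1 = -1 then [[y]] else []) ++ pvEmit ys q = pvEmit ys q)]
      rw [← hIH]
      simp

-- ===== VERDICT =====
theorem pv_alt_flatMap (ids sep : List Int) :
    split_ids_py_alt ids sep
      = (List.zip ((-1) :: pvCuts sep ids 0) (pvCuts sep ids 0 ++ [(ids.length : Int)])).flatMap
          (pvEmit ids) := by
  have hfun : (fun (out : List (List Int)) (p : Int × Int) =>
      let out' := if p.1 ≥ 0 then out ++ [PySem.List.slice ids (some p.1) (some (p.1 + 1))] else out
      if p.2 > p.1 + 1 then out' ++ [PySem.List.slice ids (some (p.1 + 1)) (some p.2)] else out')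
      = (fun out p => out ++ pvEmit ids p) := by
    funext out p
    simp only [pvEmit]
    split_ifs <;> simp [List.append_assoc]
  show (List.zip ((-1) :: pvCuts sep ids 0) (pvCuts sep ids 0 ++ [(ids.length : Int)])).foldl
      (fun out p =>
        let out' := if p.1 ≥ 0 then out ++ [PySem.List.slice ids (some p.1) (some (p.1 + 1))] else out
        if p.2 > p.1 + 1 then out' ++ [PySem.List.slice ids (some (p.1 + 1)) (some p.2)] else out') []
    = _
  rw [hfun, PySem.List.foldl_append_eq_flatMap]
  simp

theorem split_ids_py_spec : Claim_equal_split_ids_py := by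
  intro ids sep _
  unfold Spec_split_ids_py
  have hA : split_ids_py ids sep = [] ++ pvG sep [] ids := pvA_foldl sep ids [] []
  rw [hA, pv_alt_flatMap ids sep, pvB_eq_pvG sep ids.length ids rfl]
  simp
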